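-- pv_equiv track=rewrite | github.com/GangYunGit/APS | 프로그래머스/lv2/77885. 2개 이하로 다른 비트/2개 이하로 다른 비트.py | func
-- ===== SOURCE A (Python) =====
-- def func(num):
--     check = 1
--     result = 0
--     bin_num = bin(num)[2:][::-1] + '0'
--     if bin_num[0] == '1':
--         for i in range(len(bin_num)):
--             if bin_num[i] == '0':
--                 num -= 2 ** (i - 1)
--                 num += 2 ** i
--                 return num
--     else:
--         return num + 1
-- ===== SOURCE B (Python) =====
-- def func(num):
--     # even: flipping the last bit (one changed bit) gives num + 1;
--     # odd: num ^ (num+1) is a block of (t+1) ones where t = number of trailing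
--     # ones of num, so ((num ^ (num+1)) + 1) // 4 == 2**(t-1), and the smallest
--     # larger number within two changed bits is num + 2**(t-1).
--     if num % 2 == 0:
--         return num + 1
--     return num + ((num ^ (num + 1)) + 1) // 4
-- ===== Notes on version B (the rewrite author's own statement) =====
-- stated objective: alternative
-- what changed: B replaces A's binary-string construction (bin, slice, reverse, character scan) by a closed-form bit identity: for odd num the answer is num + ((num ^ (num+1)) + 1)//4, for even num it is num + 1; no string is built and no loop runs.
-- outside the precondition, e.g. on func(-5): A returns -4, B returns -3; on func(-15): A returns 1, B returns -14; on func(-1): A returns 1, B returns -1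
import Mathlib
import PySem

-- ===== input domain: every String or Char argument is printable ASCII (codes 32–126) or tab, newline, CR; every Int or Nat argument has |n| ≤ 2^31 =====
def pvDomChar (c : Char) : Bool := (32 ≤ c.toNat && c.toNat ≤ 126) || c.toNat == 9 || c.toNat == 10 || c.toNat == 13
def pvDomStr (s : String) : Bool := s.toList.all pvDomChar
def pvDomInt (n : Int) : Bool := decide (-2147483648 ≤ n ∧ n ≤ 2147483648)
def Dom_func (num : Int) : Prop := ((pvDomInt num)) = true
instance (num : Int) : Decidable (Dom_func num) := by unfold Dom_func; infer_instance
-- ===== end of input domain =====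

-- B replaces A's binary-string build-reverse-scan by a closed-form bit identity (num+1 for even
-- num, num + ((num ^ (num+1)) + 1)//4 for odd num); equivalence is claimed except on odd negative
-- num, where A's value is an artefact of slicing the 'b' of bin()'s '-0b' prefix.


-- ===== PORT A =====
-- binary digits of n, least-significant bit first (helper for the hand port of bin())
def bitsLSB (n : Nat) : List Char :=
  if h : n = 0 then [] else (if n % 2 = 1 then '1' else '0') :: bitsLSB (n / 2)
termination_by n
decreasing_by exact Nat.div_lt_self (Nat.pos_of_ne_zero h) one_lt_two

-- bin(num)[2:], ported by hand (exact, incl. negatives: the slice keeps the 'b' of '-0b…')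
def pyBinTail (num : Int) : List Char :=
  if num < 0 then 'b' :: (bitsLSB num.natAbs).reverse
  else if num = 0 then ['0'] else (bitsLSB num.toNat).reverse

-- A's for-loop: scan bin_num from index i, on the first '0' return num - 2**(i-1) + 2**i
-- (the reachable hits have i ≥ 1, since the loop only runs when bin_num[0] = '1')
def findFix (num : Int) : List Char → Nat → Option Int
  | [], _ => none
  | c :: rest, i => if c = '0' then some (num - 2 ^ (i - 1) + 2 ^ i) else findFix num rest (i + 1)

-- port of A (its dead locals check/result are omitted); bin_num is nonempty and ends in '0',
-- so headD's default and getD's default are never consulted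
def func (num : Int) : Int :=
  let bin_num := (pyBinTail num).reverse ++ ['0']
  if bin_num.headD ' ' = '1' then (findFix num bin_num 0).getD 0
  else num + 1

-- ===== PORT B =====
def func_alt (num : Int) : Int :=
  if PySem.Int.mod num 2 = 0 then num + 1
  else num + PySem.Int.floordiv (PySem.Int.bxor num (num + 1) + 1) 4

-- ===== PRECONDITION & SPEC =====
-- Pre_ excludes odd negative num, outside the problem's natural domain, where A's returned value
-- is an artefact of scanning past the 'b' kept by slicing bin()'s '-0b' prefix (e.g. func(-15) = 1).
def Pre_func (num : Int) : Prop := 0 ≤ num ∨ num % 2 = 0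
instance (num : Int) : Decidable (Pre_func num) := by unfold Pre_func; infer_instance
def pvWitness_func : Int := 5

def Spec_func (num : Int) (out : Int) : Prop := out = func_alt num
instance (num : Int) (out : Int) : Decidable (Spec_func num out) := by unfold Spec_func; infer_instance

-- ===== CLAIM (what is proved, stated in full; the proofs are below) =====
def Claim_equal_func : Prop := ∀ (num : Int), Dom_func num → Pre_func num → Spec_func num (func num)

-- ===== LEMMAS AND PROOFS =====
-- number of trailing one-bits of n
def trailOnes (n : Nat) : Nat :=
  if h : n % 2 = 1 then trailOnes (n / 2) + 1 else 0
termination_by n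
decreasing_by exact Nat.div_lt_self (by omega) one_lt_two

-- index of the first '0' in a character list
def firstZero : List Char → Option Nat
  | [] => none
  | c :: r => if c = '0' then some 0 else (firstZero r).map (· + 1)

theorem bitsLSB_odd (k : Nat) : bitsLSB (2 * k + 1) = '1' :: bitsLSB k := by
  rw [bitsLSB, dif_neg (by omega : ¬ 2 * k + 1 = 0), if_pos (by omega : (2 * k + 1) % 2 = 1),
      show (2 * k + 1) / 2 = k from by omega]

theorem bitsLSB_even (k : Nat) (hk : 0 < k) : bitsLSB (2 * k) = '0' :: bitsLSB k := by
  rw [bitsLSB, dif_neg (by omega : ¬ 2 * k = 0), if_neg (by omega : ¬ (2 * k) % 2 = 1),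
      show (2 * k) / 2 = k from by omega]

theorem trailOnes_even (n : Nat) (h : n % 2 = 0) : trailOnes n = 0 := by
  rw [trailOnes, dif_neg (by omega : ¬ n % 2 = 1)]

theorem trailOnes_odd (k : Nat) : trailOnes (2 * k + 1) = trailOnes k + 1 := by
  rw [trailOnes, dif_pos (by omega : (2 * k + 1) % 2 = 1),
      show (2 * k + 1) / 2 = k from by omega]

theorem firstZero_bits (n : Nat) : firstZero (bitsLSB n ++ ['0']) = some (trailOnes n) := by
  induction n using Nat.strong_induction_on with
  | _ n ih =>
    rcases Nat.eq_zero_or_pos n with h0 | hpos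
    · subst h0
      rw [bitsLSB, trailOnes]; simp [firstZero]
    · rcases Nat.even_or_odd n with ⟨k, hk⟩ | ⟨k, hk⟩
      · have hk' : n = 2 * k := by omega
        subst hk'
        rw [bitsLSB_even k (by omega), trailOnes_even _ (by omega)]
        simp [firstZero]
      · have hk' : n = 2 * k + 1 := by omega
        subst hk'
        rw [bitsLSB_odd, trailOnes_odd]
        simp [firstZero, ih k (by omega)]

theorem findFix_eq (l : List Char) (num : Int) (i : Nat) :
    findFix num l i = (firstZero l).map (fun j => num - 2 ^ (i + j - 1) + 2 ^ (i + j)) := by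
  induction l generalizing i with
  | nil => simp [findFix, firstZero]
  | cons c r ihl =>
    by_cases hc : c = '0'
    · simp [findFix, firstZero, hc]
    · rw [findFix, firstZero]
      simp only [hc, if_false, ihl (i + 1), Option.map_map]
      rcases firstZero r with _ | j
      · simp
      · simp only [Option.map_some, Function.comp]
        have e1 : i + 1 + j - 1 = i + (j + 1) - 1 := by omega
        have e2 : i + 1 + j = i + (j + 1) := by omega
        rw [e1, e2]

theorem xor_succ (n : Nat) : n ^^^ (n + 1) = 2 ^ (trailOnes n + 1) - 1 := by
  induction n using Nat.strong_induction_on with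
  | _ n ih =>
    rcases Nat.even_or_odd n with ⟨k, hk⟩ | ⟨k, hk⟩
    · have hk' : n = 2 * k := by omega
      subst hk'
      rw [trailOnes_even _ (by omega)]
      have hb : 2 * k = Nat.bit false k := by simp [Nat.bit]
      have hb' : 2 * k + 1 = Nat.bit true k := by simp [Nat.bit]
      rw [hb', hb, Nat.xor_bit]
      simp [Nat.bit]
    · have hk' : n = 2 * k + 1 := by omega
      subst hk'
      rw [trailOnes_odd]
      have hb : 2 * k + 1 = Nat.bit true k := by simp [Nat.bit]
      have hb' : 2 * k + 1 + 1 = Nat.bit false (k + 1) := by simp [Nat.bit]; omega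
      rw [hb', hb, Nat.xor_bit, ih k (by omega)]
      have hpow : 1 ≤ 2 ^ (trailOnes k + 1) := Nat.one_le_two_pow
      have : (2 : Nat) ^ (trailOnes k + 1 + 1) = 2 * 2 ^ (trailOnes k + 1) := by ring
      simp [Nat.bit]
      omega

theorem func_even (k : Nat) : func ((2 * k : Nat) : Int) = (2 * k : Nat) + 1 := by
  rcases Nat.eq_zero_or_pos k with h0 | hpos
  · subst h0
    simp [func, pyBinTail]
  · have hneg : ¬ ((2 * k : Nat) : Int) < 0 := by omega
    have hz : ¬ ((2 * k : Nat) : Int) = 0 := by omega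
    simp only [func, pyBinTail, hneg, if_false, hz, Int.toNat_natCast, List.reverse_reverse]
    rw [bitsLSB_even k hpos]
    simp

theorem func_odd (k : Nat) :
    func ((2 * k + 1 : Nat) : Int) =
      ((2 * k + 1 : Nat) : Int) - 2 ^ (trailOnes (2 * k + 1) - 1) + 2 ^ trailOnes (2 * k + 1) := by
  have hneg : ¬ ((2 * k + 1 : Nat) : Int) < 0 := by omega
  have hz : ¬ ((2 * k + 1 : Nat) : Int) = 0 := by omega
  simp only [func, pyBinTail, hneg, if_false, hz, Int.toNat_natCast, List.reverse_reverse]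
  rw [findFix_eq, firstZero_bits]
  rw [bitsLSB_odd]
  simp

theorem func_neg_even (num : Int) (hneg : num < 0) (he : num % 2 = 0) : func num = num + 1 := by
  obtain ⟨k, hk⟩ : ∃ k : Nat, num.natAbs = 2 * k := ⟨num.natAbs / 2, by omega⟩
  have hk0 : 0 < k := by omega
  simp only [func, pyBinTail, if_pos hneg, hk, List.reverse_cons, List.reverse_reverse]
  rw [bitsLSB_even k hk0]
  simp

-- ===== VERDICT (by name: the statement is the Claim_ definition above) =====
theorem func_spec : Claim_equal_func := by
  intro num _ hpre
  unfold Spec_func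
  by_cases hnn : 0 ≤ num
  case neg =>
    -- num < 0, so Pre_ forces num even: both sides are num + 1
    have he : num % 2 = 0 := hpre.resolve_left hnn
    have hmod : PySem.Int.mod num 2 = 0 := by
      rw [PySem.Int.mod_eq_emod_of_pos (by norm_num)]; exact he
    rw [func_neg_even num (by omega) he, func_alt, if_pos hmod]
  obtain ⟨n, rfl⟩ : ∃ m : Nat, num = (m : Int) := ⟨num.toNat, (Int.toNat_of_nonneg hnn).symm⟩
  rcases Nat.even_or_odd n with ⟨k, hk⟩ | ⟨k, hk⟩
  · -- even: both sides are num + 1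
    have hk' : n = 2 * k := by omega
    subst hk'
    have hmod : PySem.Int.mod ((2 * k : Nat) : Int) 2 = 0 := by
      rw [PySem.Int.mod_eq_emod_of_pos (by norm_num)]; omega
    rw [func_even, func_alt, if_pos hmod]
  · -- odd: A returns num - 2^(t-1) + 2^t, B returns num + 2^(t-1), t = trailOnes n ≥ 1
    have hk' : n = 2 * k + 1 := by omega
    subst hk'
    have hmod : ¬ PySem.Int.mod ((2 * k + 1 : Nat) : Int) 2 = 0 := by
      rw [PySem.Int.mod_eq_emod_of_pos (by norm_num)]; omega
    rw [func_odd, func_alt, if_neg hmod]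
    have hcast : ((2 * k + 1 : Nat) : Int) + 1 = ((2 * k + 1 + 1 : Nat) : Int) := by push_cast; ring
    rw [hcast, PySem.Int.bxor_natCast, xor_succ]
    set t := trailOnes (2 * k + 1) with ht
    have ht1 : t = trailOnes k + 1 := by rw [ht, trailOnes_odd]
    have hpow1 : 1 ≤ (2 : Nat) ^ (t + 1) := Nat.one_le_two_pow
    have hxcast : ((2 ^ (t + 1) - 1 : Nat) : Int) + 1 = ((2 ^ (t + 1) : Nat) : Int) := by
      omega
    rw [hxcast]
    have hfour : ((2 ^ (t + 1) : Nat) : Int) = 4 * 2 ^ (t - 1) := by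
      have : (2 : Int) ^ (t + 1) = 4 * 2 ^ (t - 1) := by
        rw [show t + 1 = (t - 1) + 2 from by omega, pow_add]; ring
      push_cast
      rw [this]
    rw [hfour, PySem.Int.floordiv_eq_ediv_of_pos (by norm_num),
        Int.mul_ediv_cancel_left _ (by norm_num)]
    have h2t : (2 : Int) ^ t = 2 ^ (t - 1) * 2 := by
      have hp := pow_succ (2 : Int) (t - 1)
      rw [show t - 1 + 1 = t from by omega] at hp
      exact hp
    rw [h2t]; ring
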